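-- pv_equiv track=rewrite | github.com/piotrdetyna/awesome-oi | 9-rownanie-na-slowach/solution.py | count_possible_answers
-- ===== SOURCE A (Python) =====
-- from collections import defaultdict
--
-- def find_connected_components(graph):
--
--     visited = set()
--     components = []
--
--     def dfs(v):
--         visited.add(v)
--         component.append(v)
--         for neighbor in graph[v]:
--             if neighbor not in visited:
--                 dfs(neighbor)
--
--     for v in graph:
--         if v not in visited:
--             component = []
--             dfs(v)
--             components.append(component)
--
--     return components
--
-- def count_possible_answers(left, right, lengths):
--     extended_left, extended_right = extend(left, lengths), extend(right, lengths)
--     if len(extended_left) != len(extended_right):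
--         return 0
--
--     graph = defaultdict(list)
--     for l, r in zip(extended_left, extended_right):
--         graph[l].append(r)
--         graph[r].append(l)
--
--     components = find_connected_components(graph)
--     counter = 0
--     for component in components:
--         is_1_in_component, is_0_in_component = '1' in component, '0' in component
--         if is_1_in_component and is_0_in_component: # równanie sprzeczne
--             return 0
--         if is_1_in_component or is_0_in_component: # każdy znak w spójnej składowej to 0 lub 1
--             continue                               # więc nie zwiększa ona ilości rozwiązań
--         counter += 1
--     return 2**counter
--
-- def extend(text, lengths):
--
--     extended = []
--     for char in text:
--         if char in ['0', '1']:
--             extended.append(char)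
--             continue
--         for j in range(lengths[char]):
--             extended.append(f'{char}{j}')
--
--     return extended
-- ===== SOURCE B (Python) =====
-- def extend(text, lengths):
--     extended = []
--     for char in text:
--         if char in ['0', '1']:
--             extended.append(char)
--             continue
--         for j in range(lengths[char]):
--             extended.append(f'{char}{j}')
--     return extended
--
--
-- def count_possible_answers(left, right, lengths):
--     extended_left, extended_right = extend(left, lengths), extend(right, lengths)
--     if len(extended_left) != len(extended_right):
--         return 0
--
--     # flat union-find: comp maps every seen node straight to its class label
--     comp = {}
--     for l, r in zip(extended_left, extended_right):
--         rl = comp.get(l, l)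
--         rr = comp.get(r, r)
--         comp[l] = rl
--         comp[r] = rr
--         if rl != rr:
--             for k in comp:
--                 if comp[k] == rl:
--                     comp[k] = rr
--
--     # per class label: does the class contain '0' / '1'?
--     flags = {}
--     for node, root in comp.items():
--         f = flags.get(root, (False, False))
--         flags[root] = (f[0] or node == '0', f[1] or node == '1')
--
--     counter = 0
--     for has0, has1 in flags.values():
--         if has0 and has1:
--             return 0
--         if not has0 and not has1:
--             counter += 1
--     return 2 ** counter
-- ===== Notes on version B (the rewrite author's own statement) =====
-- stated objective: alternative
-- what changed: Replaces A's adjacency-list graph plus recursive DFS component enumeration by a flat union-find: a dict mapping every node straight to its class label, relabelled on merges, with per-label 0/1 flags collected in one pass.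
import Mathlib
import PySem

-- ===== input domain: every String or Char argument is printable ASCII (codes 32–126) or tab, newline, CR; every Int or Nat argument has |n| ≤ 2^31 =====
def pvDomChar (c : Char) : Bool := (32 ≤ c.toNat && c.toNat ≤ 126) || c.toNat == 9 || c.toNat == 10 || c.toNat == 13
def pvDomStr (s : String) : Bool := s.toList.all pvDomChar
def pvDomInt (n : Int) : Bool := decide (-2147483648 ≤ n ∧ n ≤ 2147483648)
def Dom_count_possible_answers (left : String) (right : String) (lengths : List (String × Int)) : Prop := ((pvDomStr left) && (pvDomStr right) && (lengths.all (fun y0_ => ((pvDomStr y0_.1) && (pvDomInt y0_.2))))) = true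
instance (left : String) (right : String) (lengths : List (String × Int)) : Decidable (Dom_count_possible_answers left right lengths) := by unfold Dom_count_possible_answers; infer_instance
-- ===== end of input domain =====

-- B replaces A's adjacency-list + recursive-DFS component search by a flat union-find
-- (a node→label dict relabelled on merges); same return value, alternative algorithm.

-- ===== PORT A =====

-- extend(text, lengths): none = KeyError (a char outside '0'/'1' missing from lengths)
def pyExtendA (text : String) (lengths : List (String × Int)) : Option (List String) :=
  text.toList.foldl (fun acc c =>
    match acc with
    | none => none
    | some ext =>
      if c ∈ ['0', '1'] then some (ext ++ [String.ofList [c]])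
      else
        match (PySem.Dict.mk lengths).get? (String.ofList [c]) with
        | none => none
        | some n => some (ext ++ (PySem.List.pyRange 0 n 1).map
            (fun j => String.ofList [c] ++ PySem.Int.toStr j)))
    (some [])

-- graph = defaultdict(list); graph[l].append(r); graph[r].append(l)
def buildGA (E : List (String × String)) : PySem.Dict String (List String) :=
  E.foldl (fun g p =>
    (g.modify p.1 [] (fun xs => xs ++ [p.2])).modify p.2 [] (fun xs => xs ++ [p.1]))
    PySem.Dict.empty

-- the recursive dfs; fuel ≥ number of unvisited nodes makes the 0-branch unreachable
def dfsA (g : PySem.Dict String (List String)) :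
    Nat → String → (PySem.Set String × List String) → (PySem.Set String × List String)
  | 0, _, st => st
  | fuel+1, v, st =>
    let vis := PySem.Set.add st.1 v
    let comp := st.2 ++ [v]
    (g.getD v []).foldl
      (fun st' nb => if nb ∈ st'.1 then st' else dfsA g fuel nb st') (vis, comp)

-- find_connected_components
def fccA (g : PySem.Dict String (List String)) : List (List String) :=
  (g.keys.foldl (fun acc v =>
      if v ∈ acc.1 then acc
      else
        let st := dfsA g g.keys.length v (acc.1, [])
        (st.1, acc.2 ++ [st.2]))
    ((PySem.Set.empty : PySem.Set String), ([] : List (List String)))).2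

-- the counting loop over components (early return 0 on a contradictory component)
def goA : List (List String) → Nat → Int
  | [], c => (2 : Int) ^ c
  | comp :: rest, c =>
    let is1 := "1" ∈ comp
    let is0 := "0" ∈ comp
    if is1 ∧ is0 then 0
    else if is1 ∨ is0 then goA rest c
    else goA rest (c + 1)

def count_possible_answers (left : String) (right : String) (lengths : List (String × Int)) : Int :=
  match pyExtendA left lengths, pyExtendA right lengths with
  | some el, some er =>
    if el.length ≠ er.length then 0
    else goA (fccA (buildGA (el.zip er))) 0
  | _, _ => 0   -- Python raises KeyError here; excluded by Pre_

-- ===== PORT B =====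

def pyExtendB (text : String) (lengths : List (String × Int)) : Option (List String) :=
  text.toList.foldl (fun acc c =>
    match acc with
    | none => none
    | some ext =>
      if c ∈ ['0', '1'] then some (ext ++ [String.ofList [c]])
      else
        match (PySem.Dict.mk lengths).get? (String.ofList [c]) with
        | none => none
        | some n => some (ext ++ (PySem.List.pyRange 0 n 1).map
            (fun j => String.ofList [c] ++ PySem.Int.toStr j)))
    (some [])

-- one edge of the flat union-find: look up both labels, record both nodes, relabel on merge
def mergeStep (d : PySem.Dict String String) (p : String × String) : PySem.Dict String String :=
  let rl := d.getD p.1 p.1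
  let rr := d.getD p.2 p.2
  let d1 := (d.insert p.1 rl).insert p.2 rr
  if rl ≠ rr then PySem.Dict.mk (d1.items.map (fun q => if q.2 = rl then (q.1, rr) else q))
  else d1

def buildComp (E : List (String × String)) : PySem.Dict String String :=
  E.foldl mergeStep PySem.Dict.empty

-- flags[root] = (class contains '0', class contains '1')
def flagsOf (comp : PySem.Dict String String) : PySem.Dict String (Bool × Bool) :=
  comp.items.foldl (fun fl q =>
    let f := fl.getD q.2 (false, false)
    fl.insert q.2 (f.1 || decide (q.1 = "0"), f.2 || decide (q.1 = "1")))
    PySem.Dict.empty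

def goB : List (Bool × Bool) → Nat → Int
  | [], c => (2 : Int) ^ c
  | f :: rest, c =>
    if f.1 && f.2 then 0
    else if !f.1 && !f.2 then goB rest (c + 1)
    else goB rest c

def count_possible_answers_alt (left : String) (right : String) (lengths : List (String × Int)) : Int :=
  match pyExtendB left lengths with
  | none => 0   -- Python raises KeyError here; excluded by Pre_
  | some el =>
    match pyExtendB right lengths with
    | none => 0
    | some er =>
      if el.length ≠ er.length then 0
      else goB (flagsOf (buildComp (el.zip er))).values 0

-- ===== PRECONDITION & SPEC =====

-- Pre_ excludes exactly the KeyError inputs: a character of left/right other than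
-- '0'/'1' that is not a key of lengths makes Python's extend raise.
def Pre_count_possible_answers (left : String) (right : String) (lengths : List (String × Int)) : Prop :=
  ((left.toList ++ right.toList).all
    (fun c => c == '0' || c == '1' || lengths.any (fun q => q.1 == String.ofList [c]))) = true
instance (left : String) (right : String) (lengths : List (String × Int)) :
    Decidable (Pre_count_possible_answers left right lengths) := by
  unfold Pre_count_possible_answers; infer_instance

def pvWitness_count_possible_answers : String × String × (List (String × Int)) :=
  ("ab1", "ba1", [("a", 2), ("b", 2)])

def Spec_count_possible_answers (left : String) (right : String) (lengths : List (String × Int)) (out : Int) : Prop := out = count_possible_answers_alt left right lengths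
instance (left : String) (right : String) (lengths : List (String × Int)) (out : Int) : Decidable (Spec_count_possible_answers left right lengths out) := by unfold Spec_count_possible_answers; infer_instance

-- ===== CLAIM (what is proved, stated in full; the proofs are below) =====
def Claim_equal_count_possible_answers : Prop := ∀ (left : String) (right : String) (lengths : List (String × Int)), Dom_count_possible_answers left right lengths → Pre_count_possible_answers left right lengths → Spec_count_possible_answers left right lengths (count_possible_answers left right lengths)

-- ===== LEMMAS AND PROOFS =====

-- ---------- the connectivity relation generated by the edge list ----------

def NodeRel (E : List (String × String)) (u v : String) : Prop := (u, v) ∈ E ∨ (v, u) ∈ E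

def Conn (E : List (String × String)) : String → String → Prop :=
  Relation.ReflTransGen (NodeRel E)

def nodesList (E : List (String × String)) : List String :=
  PySem.Set.ofList (E.flatMap fun p => [p.1, p.2])

theorem nodeRel_symm {E : List (String × String)} {u v : String} (h : NodeRel E u v) :
    NodeRel E v u := h.symm

theorem conn_symm {E : List (String × String)} {u v : String} (h : Conn E u v) : Conn E v u := by
  induction h with
  | refl => exact Relation.ReflTransGen.refl
  | tail _ hstep ih => exact (Relation.ReflTransGen.single (nodeRel_symm hstep)).trans ih

theorem conn_single {E : List (String × String)} {u v : String} (h : NodeRel E u v) :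
    Conn E u v := Relation.ReflTransGen.single h

theorem mem_nodesList_iff {E : List (String × String)} {u : String} :
    u ∈ nodesList E ↔ (∃ p ∈ E, p.1 = u ∨ p.2 = u) := by
  simp only [nodesList, PySem.Set.mem_ofList, List.mem_flatMap, List.mem_cons,
    List.not_mem_nil, or_false]
  constructor
  · rintro ⟨p, hp, h | h⟩ <;> exact ⟨p, hp, by simp [h]⟩
  · rintro ⟨p, hp, h | h⟩ <;> exact ⟨p, hp, by simp [h]⟩

theorem nodeRel_mem_left {E : List (String × String)} {u v : String} (h : NodeRel E u v) :
    u ∈ nodesList E := by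
  rcases h with h | h
  · exact mem_nodesList_iff.2 ⟨(u, v), h, Or.inl rfl⟩
  · exact mem_nodesList_iff.2 ⟨(v, u), h, Or.inr rfl⟩

theorem nodeRel_mem_right {E : List (String × String)} {u v : String} (h : NodeRel E u v) :
    v ∈ nodesList E := nodeRel_mem_left (nodeRel_symm h)

theorem conn_mem {E : List (String × String)} {u v : String} (hu : u ∈ nodesList E)
    (h : Conn E u v) : v ∈ nodesList E := by
  induction h with
  | refl => exact hu
  | tail _ hstep _ => exact nodeRel_mem_right hstep

theorem conn_eq_of_not_mem {E : List (String × String)} {u v : String} (hu : u ∉ nodesList E)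
    (h : Conn E u v) : v = u := by
  rcases Relation.ReflTransGen.cases_head h with h | ⟨w, hstep, _⟩
  · exact h.symm
  · exact absurd (nodeRel_mem_left hstep) hu

theorem conn_mono {E : List (String × String)} {p : String × String} {u v : String}
    (h : Conn E u v) : Conn (E ++ [p]) u v := by
  refine Relation.ReflTransGen.mono ?_ h
  rintro a b (hab | hab)
  · exact Or.inl (List.mem_append_left _ hab)
  · exact Or.inr (List.mem_append_left _ hab)

theorem conn_snoc {E : List (String × String)} {l r u v : String} :
    Conn (E ++ [(l, r)]) u v ↔
      Conn E u v ∨ (Conn E u l ∧ Conn E r v) ∨ (Conn E u r ∧ Conn E l v) := by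
  constructor
  · intro h
    induction h with
    | refl => exact Or.inl Relation.ReflTransGen.refl
    | tail _ hstep ih =>
      rename_i b c _
      have hstep' : NodeRel E b c ∨ (b = l ∧ c = r) ∨ (b = r ∧ c = l) := by
        rcases hstep with h | h <;> rcases List.mem_append.1 h with h | h
        · exact Or.inl (Or.inl h)
        · simp only [List.mem_singleton, Prod.mk.injEq] at h
          exact Or.inr (Or.inl ⟨h.1, h.2⟩)
        · exact Or.inl (Or.inr h)
        · simp only [List.mem_singleton, Prod.mk.injEq] at h
          exact Or.inr (Or.inr ⟨h.2, h.1⟩)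
      rcases hstep' with hs | ⟨hb, hc⟩ | ⟨hb, hc⟩
      · rcases ih with ih | ⟨ih1, ih2⟩ | ⟨ih1, ih2⟩
        · exact Or.inl (ih.tail hs)
        · exact Or.inr (Or.inl ⟨ih1, ih2.tail hs⟩)
        · exact Or.inr (Or.inr ⟨ih1, ih2.tail hs⟩)
      · subst hb; subst hc
        rcases ih with ih | ⟨ih1, _⟩ | ⟨ih1, _⟩
        · exact Or.inr (Or.inl ⟨ih, Relation.ReflTransGen.refl⟩)
        · exact Or.inr (Or.inl ⟨ih1, Relation.ReflTransGen.refl⟩)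
        · exact Or.inl ih1
      · subst hb; subst hc
        rcases ih with ih | ⟨ih1, _⟩ | ⟨ih1, _⟩
        · exact Or.inr (Or.inr ⟨ih, Relation.ReflTransGen.refl⟩)
        · exact Or.inl ih1
        · exact Or.inr (Or.inr ⟨ih1, Relation.ReflTransGen.refl⟩)
  · have hedge : Conn (E ++ [(l, r)]) l r :=
      conn_single (Or.inl (List.mem_append_right _ (List.mem_singleton.2 rfl)))
    rintro (h | ⟨h1, h2⟩ | ⟨h1, h2⟩)
    · exact conn_mono h
    · exact ((conn_mono h1).trans hedge).trans (conn_mono h2)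
    · exact ((conn_mono h1).trans (conn_symm hedge)).trans (conn_mono h2)

-- ---------- the shared list of class representatives, in key order ----------

inductive RepsOf (E : List (String × String)) :
    List String → List String → List String → Prop
  | nil (seen : List String) : RepsOf E seen [] []
  | skip {seen : List String} {v : String} {K reps : List String}
      (h : ∃ u ∈ seen, Conn E u v) (ht : RepsOf E (seen ++ [v]) K reps) :
      RepsOf E seen (v :: K) reps
  | keep {seen : List String} {v : String} {K reps : List String}
      (h : ¬ ∃ u ∈ seen, Conn E u v) (ht : RepsOf E (seen ++ [v]) K reps) :
      RepsOf E seen (v :: K) (v :: reps)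

theorem repsOf_unique {E : List (String × String)} {seen K reps reps' : List String}
    (h1 : RepsOf E seen K reps) (h2 : RepsOf E seen K reps') : reps = reps' := by
  induction h1 generalizing reps' with
  | nil _ => cases h2; rfl
  | skip h ht ih => cases h2 with
    | skip h' ht' => exact ih ht'
    | keep h' ht' => exact absurd h h'
  | keep h ht ih => cases h2 with
    | skip h' ht' => exact absurd h' h
    | keep h' ht' => rw [ih ht']

-- ---------- A side: the graph ----------

theorem keys_insert_set {ν : Type} (d : PySem.Dict String ν) (k : String) (v : ν) :
    (d.insert k v).keys = PySem.Set.add d.keys k := by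
  by_cases h : d.contains k
  · rw [PySem.Dict.keys_insert_of_contains _ _ h,
      PySem.Set.add_of_mem ((PySem.Dict.contains_iff_mem_keys _ _).1 h)]
  · rw [PySem.Dict.keys_insert_of_not_contains _ _ (by simpa using h),
      PySem.Set.add_of_not_mem]
    rw [← PySem.Dict.contains_iff_mem_keys]; simpa using h

theorem keys_modify_set {ν : Type} (d : PySem.Dict String ν) (k : String) (d0 : ν)
    (f : ν → ν) : (d.modify k d0 f).keys = PySem.Set.add d.keys k := by
  rw [PySem.Dict.keys_modify, keys_insert_set]

theorem keys_buildGA (E : List (String × String)) : (buildGA E).keys = nodesList E := by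
  suffices h : ∀ d : PySem.Dict String (List String),
      (E.foldl (fun g p =>
        (g.modify p.1 [] (fun xs => xs ++ [p.2])).modify p.2 [] (fun xs => xs ++ [p.1])) d).keys
      = PySem.Set.update d.keys (E.flatMap fun p => [p.1, p.2]) by
    rw [buildGA, h PySem.Dict.empty, PySem.Dict.keys_empty, PySem.Set.update_nil_left, nodesList]
  induction E with
  | nil => intro d; simp [PySem.Set.update]
  | cons p E ih =>
    intro d
    simp only [List.foldl_cons, List.flatMap_cons, List.cons_append, List.nil_append]
    rw [ih, keys_modify_set, keys_modify_set, PySem.Set.update_cons, PySem.Set.update_cons]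

theorem adj_mem {E : List (String × String)} {v x : String} :
    x ∈ (buildGA E).getD v [] ↔ NodeRel E v x := by
  suffices h : ∀ d : PySem.Dict String (List String),
      x ∈ ((E.foldl (fun g p =>
        (g.modify p.1 [] (fun xs => xs ++ [p.2])).modify p.2 [] (fun xs => xs ++ [p.1])) d).getD v [])
      ↔ x ∈ d.getD v [] ∨ NodeRel E v x by
    rw [buildGA, h PySem.Dict.empty]
    simp [NodeRel, PySem.Dict.getD_eq_get?_getD, PySem.Dict.get?_empty]
  induction E with
  | nil => intro d; simp [NodeRel]
  | cons p E ih =>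
    intro d
    simp only [List.foldl_cons]
    rw [ih]
    have h2 : ∀ y : String, NodeRel (p :: E) v y ↔
        ((v = p.1 ∧ y = p.2) ∨ (v = p.2 ∧ y = p.1)) ∨ NodeRel E v y := by
      intro y
      simp only [NodeRel, List.mem_cons, Prod.ext_iff]
      constructor
      · rintro ((⟨h1, h2⟩ | h) | (⟨h1, h2⟩ | h))
        · exact Or.inl (Or.inl ⟨h1, h2⟩)
        · exact Or.inr (Or.inl h)
        · exact Or.inl (Or.inr ⟨h2, h1⟩)
        · exact Or.inr (Or.inr h)
      · rintro ((⟨h1, h2⟩ | ⟨h1, h2⟩) | (h | h))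
        · exact Or.inl (Or.inl ⟨h1, h2⟩)
        · exact Or.inr (Or.inl ⟨h2, h1⟩)
        · exact Or.inl (Or.inr h)
        · exact Or.inr (Or.inr h)
    have hstep : x ∈ ((d.modify p.1 [] (fun xs => xs ++ [p.2])).modify p.2 []
        (fun xs => xs ++ [p.1])).getD v []
        ↔ x ∈ d.getD v [] ∨ ((v = p.1 ∧ x = p.2) ∨ (v = p.2 ∧ x = p.1)) := by
      simp only [PySem.Dict.getD_modify]
      split_ifs with h1 h2 h3 <;> simp_all [List.mem_append]
    rw [h2, hstep]
    tauto

-- ---------- A side: DFS ----------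

-- number of not-yet-visited nodes (the fuel measure)
def unvis (K vis : List String) : Nat := K.countP (fun u => !(u ∈ vis : Bool))

theorem unvis_le_length (K vis : List String) : unvis K vis ≤ K.length :=
  List.countP_le_length

theorem unvis_mono {K vis vis' : List String} (hsub : ∀ u ∈ vis, u ∈ vis') :
    unvis K vis' ≤ unvis K vis := by
  refine List.countP_mono_left ?_
  intro x _ hx
  simp only [Bool.not_eq_eq_eq_not, Bool.not_true, decide_eq_false_iff_not] at hx ⊢
  exact fun hmem => hx (hsub x hmem)

theorem unvis_lt {K vis vis' : List String} {v : String} (hvK : v ∈ K) (hv : v ∉ vis)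
    (hsub : ∀ u ∈ vis, u ∈ vis') (hv' : v ∈ vis') : unvis K vis' < unvis K vis := by
  induction K with
  | nil => cases hvK
  | cons k K ih =>
    unfold unvis at *
    rw [List.countP_cons, List.countP_cons]
    have hmono := unvis_mono (K := K) hsub
    unfold unvis at hmono
    rcases List.mem_cons.1 hvK with rfl | h
    · simp only [hv', decide_true, Bool.not_true, hv, decide_false, Bool.not_false]
      simp
      omega
    · have hlt := ih h
      have h1 : (if (!decide (k ∈ vis')) = true then 1 else 0)
          ≤ (if (!decide (k ∈ vis)) = true then 1 else 0) := by
        by_cases hk' : k ∈ vis' <;> by_cases hk : k ∈ vis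
        · simp [hk', hk]
        · simp [hk', hk]
        · exact absurd (hsub k hk) hk'
        · simp [hk', hk]
      omega

def dfsF (E : List (String × String)) (fuel : Nat) :
    (PySem.Set String × List String) → String → (PySem.Set String × List String) :=
  fun st' nb => if nb ∈ st'.1 then st' else dfsA (buildGA E) fuel nb st'

theorem dfsA_succ (E : List (String × String)) (fuel : Nat) (v : String)
    (vis : PySem.Set String) (comp : List String) :
    dfsA (buildGA E) (fuel + 1) v (vis, comp)
      = ((buildGA E).getD v []).foldl (dfsF E fuel) (vis.add v, comp ++ [v]) := rfl

theorem dfs_spec (E : List (String × String)) :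
    ∀ (fuel : Nat) (v : String) (vis : PySem.Set String) (comp : List String),
      v ∈ nodesList E → v ∉ vis → unvis (nodesList E) vis ≤ fuel →
      (∀ u ∈ vis, u ∈ (dfsA (buildGA E) fuel v (vis, comp)).1) ∧
      v ∈ (dfsA (buildGA E) fuel v (vis, comp)).1 ∧
      (∀ u ∈ (dfsA (buildGA E) fuel v (vis, comp)).1, u ∈ vis ∨ Conn E v u) ∧
      (∀ u, u ∈ (dfsA (buildGA E) fuel v (vis, comp)).2 ↔
        u ∈ comp ∨ (u ∈ (dfsA (buildGA E) fuel v (vis, comp)).1 ∧ u ∉ vis)) ∧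
      (∀ u ∈ (dfsA (buildGA E) fuel v (vis, comp)).1, u ∉ vis →
        ∀ b, NodeRel E u b → b ∈ (dfsA (buildGA E) fuel v (vis, comp)).1) := by
  intro fuel
  induction fuel with
  | zero =>
    intro v vis comp hv hnv hfuel
    exfalso
    have hpos : 0 < unvis (nodesList E) vis :=
      List.countP_pos_iff.2 ⟨v, hv, by simp [hnv]⟩
    omega
  | succ fuel IH =>
    intro v vis comp hv hnv hfuel
    -- invariant-preserving foldl over any neighbour list of v
    have hfoldl : ∀ (L : List String) (st : PySem.Set String × List String),
        (∀ nb ∈ L, Conn E v nb) → (∀ nb ∈ L, nb ∈ nodesList E) →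
        (∀ u ∈ vis, u ∈ st.1) → v ∈ st.1 →
        (∀ u ∈ st.1, u ∈ vis ∨ Conn E v u) →
        (∀ u, u ∈ st.2 ↔ u ∈ comp ∨ (u ∈ st.1 ∧ u ∉ vis)) →
        (∀ u ∈ st.1, u ∉ vis → u ≠ v → ∀ b, NodeRel E u b → b ∈ st.1) →
        (∀ u ∈ st.1, u ∈ (L.foldl (dfsF E fuel) st).1) ∧
        (∀ nb ∈ L, nb ∈ (L.foldl (dfsF E fuel) st).1) ∧
        (∀ u ∈ (L.foldl (dfsF E fuel) st).1, u ∈ vis ∨ Conn E v u) ∧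
        (∀ u, u ∈ (L.foldl (dfsF E fuel) st).2 ↔
          u ∈ comp ∨ (u ∈ (L.foldl (dfsF E fuel) st).1 ∧ u ∉ vis)) ∧
        (∀ u ∈ (L.foldl (dfsF E fuel) st).1, u ∉ vis → u ≠ v →
          ∀ b, NodeRel E u b → b ∈ (L.foldl (dfsF E fuel) st).1) := by
      intro L
      induction L with
      | nil =>
        intro st _ _ h1 h2 h3 h4 h5
        exact ⟨fun u hu => hu, fun nb hnb => absurd hnb (List.not_mem_nil),
          h3, h4, h5⟩
      | cons nb L ihL =>
        intro st hLconn hLmem h1 h2 h3 h4 h5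
        simp only [List.foldl_cons]
        have hconn_nb : Conn E v nb := hLconn nb (List.mem_cons_self ..)
        by_cases hnb : nb ∈ st.1
        · have hF : dfsF E fuel st nb = st := by simp [dfsF, hnb]
          rw [hF]
          obtain ⟨c1, c2, c3, c4, c5⟩ := ihL st
            (fun x hx => hLconn x (List.mem_cons_of_mem _ hx))
            (fun x hx => hLmem x (List.mem_cons_of_mem _ hx)) h1 h2 h3 h4 h5
          exact ⟨c1, fun x hx => by
              rcases List.mem_cons.1 hx with rfl | hx
              · exact c1 x hnb
              · exact c2 x hx,
            c3, c4, c5⟩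
        · have hF : dfsF E fuel st nb = dfsA (buildGA E) fuel nb st := by
            simp [dfsF, hnb]
          rw [hF]
          have hfuel' : unvis (nodesList E) st.1 ≤ fuel := by
            have := unvis_lt (vis' := st.1) hv hnv h1 h2
            omega
          obtain ⟨r1, r2, r3, r4, r5⟩ :=
            IH nb st.1 st.2 (hLmem nb (List.mem_cons_self ..)) hnb hfuel'
          set st1 := dfsA (buildGA E) fuel nb (st.1, st.2) with hst1
          -- re-establish the invariant for st1
          have n1 : ∀ u ∈ vis, u ∈ st1.1 := fun u hu => r1 u (h1 u hu)
          have n2 : v ∈ st1.1 := r1 v h2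
          have n3 : ∀ u ∈ st1.1, u ∈ vis ∨ Conn E v u := by
            intro u hu
            rcases r3 u hu with hu' | hu'
            · exact h3 u hu'
            · exact Or.inr (hconn_nb.trans hu')
          have n4 : ∀ u, u ∈ st1.2 ↔ u ∈ comp ∨ (u ∈ st1.1 ∧ u ∉ vis) := by
            intro u
            rw [r4 u]
            constructor
            · rintro (hu | ⟨hu1, hu2⟩)
              · rcases (h4 u).1 hu with hc | ⟨hc1, hc2⟩
                · exact Or.inl hc
                · exact Or.inr ⟨r1 u hc1, hc2⟩
              · exact Or.inr ⟨hu1, fun hvz => hu2 (h1 u hvz)⟩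
            · rintro (hu | ⟨hu1, hu2⟩)
              · exact Or.inl ((h4 u).2 (Or.inl hu))
              · by_cases hu3 : u ∈ st.1
                · exact Or.inl ((h4 u).2 (Or.inr ⟨hu3, hu2⟩))
                · exact Or.inr ⟨hu1, hu3⟩
          have n5 : ∀ u ∈ st1.1, u ∉ vis → u ≠ v → ∀ b, NodeRel E u b → b ∈ st1.1 := by
            intro u hu hu1 hu2 b hb
            by_cases hu3 : u ∈ st.1
            · exact r1 b (h5 u hu3 hu1 hu2 b hb)
            · exact r5 u hu hu3 b hb
          obtain ⟨c1, c2, c3, c4, c5⟩ := ihL st1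
            (fun x hx => hLconn x (List.mem_cons_of_mem _ hx))
            (fun x hx => hLmem x (List.mem_cons_of_mem _ hx)) n1 n2 n3 n4 n5
          exact ⟨fun u hu => c1 u (r1 u hu), fun x hx => by
              rcases List.mem_cons.1 hx with rfl | hx
              · exact c1 x r2
              · exact c2 x hx,
            c3, c4, c5⟩
    rw [dfsA_succ]
    have hL1 : ∀ nb ∈ (buildGA E).getD v [], Conn E v nb :=
      fun nb hnb => conn_single (adj_mem.1 hnb)
    have hL2 : ∀ nb ∈ (buildGA E).getD v [], nb ∈ nodesList E :=
      fun nb hnb => nodeRel_mem_right (adj_mem.1 hnb)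
    have i1 : ∀ u ∈ vis, u ∈ (vis.add v : PySem.Set String) :=
      fun u hu => (PySem.Set.mem_add ..).2 (Or.inl hu)
    have i2 : v ∈ (vis.add v : PySem.Set String) :=
      (PySem.Set.mem_add ..).2 (Or.inr rfl)
    have i3 : ∀ u ∈ (vis.add v : PySem.Set String), u ∈ vis ∨ Conn E v u := by
      intro u hu
      rcases (PySem.Set.mem_add ..).1 hu with hu | rfl
      · exact Or.inl hu
      · exact Or.inr Relation.ReflTransGen.refl
    have i4 : ∀ u, u ∈ comp ++ [v] ↔
        u ∈ comp ∨ (u ∈ (vis.add v : PySem.Set String) ∧ u ∉ vis) := by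
      intro u
      rw [List.mem_append, List.mem_singleton]
      constructor
      · rintro (hu | rfl)
        · exact Or.inl hu
        · exact Or.inr ⟨i2, hnv⟩
      · rintro (hu | ⟨hu1, hu2⟩)
        · exact Or.inl hu
        · rcases (PySem.Set.mem_add ..).1 hu1 with hu | rfl
          · exact absurd hu hu2
          · exact Or.inr rfl
    have i5 : ∀ u ∈ (vis.add v : PySem.Set String), u ∉ vis → u ≠ v →
        ∀ b, NodeRel E u b → b ∈ (vis.add v : PySem.Set String) := by
      intro u hu hu1 hu2 b _
      rcases (PySem.Set.mem_add ..).1 hu with hu | rfl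
      · exact absurd hu hu1
      · exact absurd rfl hu2
    obtain ⟨c1, c2, c3, c4, c5⟩ :=
      hfoldl ((buildGA E).getD v []) (vis.add v, comp ++ [v]) hL1 hL2 i1 i2 i3 i4 i5
    refine ⟨fun u hu => c1 u (i1 u hu), c1 v i2, c3, c4, ?_⟩
    intro u hu hu1 b hb
    by_cases huv : u = v
    · subst huv
      exact c2 b (adj_mem.2 hb)
    · exact c5 u hu hu1 huv b hb

-- under a closed visited set, the dfs result is exactly the class of v
theorem closed_conn {E : List (String × String)} {vis : PySem.Set String}
    (hclosed : ∀ u ∈ vis, ∀ b, NodeRel E u b → b ∈ vis) {u w : String}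
    (hu : u ∈ vis) (h : Conn E u w) : w ∈ vis := by
  induction h with
  | refl => exact hu
  | tail _ hstep ih => exact hclosed _ ih _ hstep

theorem dfs_class (E : List (String × String)) (fuel : Nat) (v : String)
    (vis : PySem.Set String)
    (hv : v ∈ nodesList E) (hnv : v ∉ vis) (hfuel : unvis (nodesList E) vis ≤ fuel)
    (hclosed : ∀ u ∈ vis, ∀ b, NodeRel E u b → b ∈ vis) :
    (∀ u, u ∈ (dfsA (buildGA E) fuel v (vis, [])).1 ↔ u ∈ vis ∨ Conn E v u) ∧
    (∀ u, u ∈ (dfsA (buildGA E) fuel v (vis, [])).2 ↔ Conn E v u) := by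
  obtain ⟨c1, c2, c3, c4, c5⟩ := dfs_spec E fuel v vis [] hv hnv hfuel
  have hreach : ∀ u, Conn E v u → u ∈ (dfsA (buildGA E) fuel v (vis, [])).1 := by
    intro u h
    induction h with
    | refl => exact c2
    | tail _ hstep ih =>
      rename_i b c _
      by_cases hbv : b ∈ vis
      · exact c1 c (hclosed b hbv c hstep)
      · exact c5 b ih hbv c hstep
  constructor
  · intro u
    exact ⟨c3 u, fun h => by
      rcases h with h | h
      · exact c1 u h
      · exact hreach u h⟩
  · intro u
    constructor
    · intro hu
      rcases (c4 u).1 hu with hc | ⟨hc1, hc2⟩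
      · cases hc
      · rcases c3 u hc1 with h | h
        · exact absurd h hc2
        · exact h
    · intro h
      have hu1 : u ∈ (dfsA (buildGA E) fuel v (vis, [])).1 := hreach u h
      have hu2 : u ∉ vis := fun hm => hnv (closed_conn hclosed hm (conn_symm h))
      exact (c4 u).2 (Or.inr ⟨hu1, hu2⟩)

def fccStep (E : List (String × String)) :
    (PySem.Set String × List (List String)) → String →
    (PySem.Set String × List (List String)) :=
  fun acc v =>
    if v ∈ acc.1 then acc
    else ((dfsA (buildGA E) (nodesList E).length v (acc.1, [])).1,
      acc.2 ++ [(dfsA (buildGA E) (nodesList E).length v (acc.1, [])).2])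

theorem fccA_eq (E : List (String × String)) :
    fccA (buildGA E) = ((nodesList E).foldl (fccStep E)
      ((PySem.Set.empty : PySem.Set String), [])).2 := by
  unfold fccA fccStep
  rw [keys_buildGA]

theorem fcc_aux (E : List (String × String)) :
    ∀ (K' : List String) (vis : PySem.Set String) (comps : List (List String))
      (seen : List String),
      (∀ v ∈ K', v ∈ nodesList E) →
      (∀ u, u ∈ vis ↔ ∃ w ∈ seen, Conn E w u) →
      ∃ reps' newcomps vis'',
        K'.foldl (fccStep E) (vis, comps) = (vis'', comps ++ newcomps) ∧
        RepsOf E seen K' reps' ∧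
        List.Forall₂ (fun v c => ∀ u, u ∈ c ↔ Conn E v u) reps' newcomps := by
  intro K'
  induction K' with
  | nil =>
    intro vis comps seen _ _
    exact ⟨[], [], vis, by simp, RepsOf.nil seen, List.Forall₂.nil⟩
  | cons v K ih =>
    intro vis comps seen hmem hvis
    have hclosed : ∀ u ∈ vis, ∀ b, NodeRel E u b → b ∈ vis := by
      intro u hu b hb
      obtain ⟨w, hw, hconn⟩ := (hvis u).1 hu
      exact (hvis b).2 ⟨w, hw, hconn.tail hb⟩
    simp only [List.foldl_cons]
    by_cases hv : v ∈ vis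
    · have hF : fccStep E (vis, comps) v = (vis, comps) := by simp [fccStep, hv]
      rw [hF]
      obtain ⟨w0, hw0, hc0⟩ := (hvis v).1 hv
      have hvis' : ∀ u, u ∈ vis ↔ ∃ w ∈ seen ++ [v], Conn E w u := by
        intro u
        rw [hvis u]
        constructor
        · rintro ⟨w, hw, hc⟩; exact ⟨w, List.mem_append_left _ hw, hc⟩
        · rintro ⟨w, hw, hc⟩
          rcases List.mem_append.1 hw with hw | hw
          · exact ⟨w, hw, hc⟩
          · rw [List.mem_singleton] at hw; subst hw
            exact ⟨w0, hw0, hc0.trans hc⟩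
      obtain ⟨reps', newcomps, vis'', heq, hreps, hfa⟩ :=
        ih vis comps (seen ++ [v]) (fun x hx => hmem x (List.mem_cons_of_mem _ hx)) hvis'
      exact ⟨reps', newcomps, vis'', heq, RepsOf.skip ⟨w0, hw0, hc0⟩ hreps, hfa⟩
    · have hF : fccStep E (vis, comps) v =
          ((dfsA (buildGA E) (nodesList E).length v (vis, [])).1,
            comps ++ [(dfsA (buildGA E) (nodesList E).length v (vis, [])).2]) := by
        simp [fccStep, hv]
      rw [hF]
      obtain ⟨hvischar, hcompchar⟩ := dfs_class E (nodesList E).length v vis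
        (hmem v (List.mem_cons_self ..)) hv (unvis_le_length ..) hclosed
      have hvis' : ∀ u, u ∈ (dfsA (buildGA E) (nodesList E).length v (vis, [])).1 ↔
          ∃ w ∈ seen ++ [v], Conn E w u := by
        intro u
        rw [hvischar u, hvis u]
        constructor
        · rintro (⟨w, hw, hc⟩ | hc)
          · exact ⟨w, List.mem_append_left _ hw, hc⟩
          · exact ⟨v, List.mem_append_right _ (List.mem_singleton.2 rfl), hc⟩
        · rintro ⟨w, hw, hc⟩
          rcases List.mem_append.1 hw with hw | hw
          · exact Or.inl ⟨w, hw, hc⟩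
          · rw [List.mem_singleton] at hw; subst hw
            exact Or.inr hc
      obtain ⟨reps', newcomps, vis'', heq, hreps, hfa⟩ :=
        ih (dfsA (buildGA E) (nodesList E).length v (vis, [])).1
          (comps ++ [(dfsA (buildGA E) (nodesList E).length v (vis, [])).2])
          (seen ++ [v]) (fun x hx => hmem x (List.mem_cons_of_mem _ hx)) hvis'
      refine ⟨v :: reps', (dfsA (buildGA E) (nodesList E).length v (vis, [])).2 :: newcomps,
        vis'', ?_, ?_, ?_⟩
      · rw [heq, List.append_assoc]
        rfl
      · refine RepsOf.keep ?_ hreps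
        rintro ⟨u, hu, hc⟩
        exact hv ((hvis v).2 ⟨u, hu, hc⟩)
      · exact List.Forall₂.cons hcompchar hfa

theorem fcc_spec (E : List (String × String)) :
    ∃ reps, RepsOf E [] (nodesList E) reps ∧
      List.Forall₂ (fun v c => ∀ u, u ∈ c ↔ Conn E v u) reps (fccA (buildGA E)) := by
  obtain ⟨reps', newcomps, vis'', heq, hreps, hfa⟩ :=
    fcc_aux E (nodesList E) PySem.Set.empty [] [] (fun v hv => hv)
      (by intro u; simp [PySem.Set.empty])
  refine ⟨reps', hreps, ?_⟩
  rw [fccA_eq, heq]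
  exact hfa

theorem goA_goB (comps : List (List String)) (flags : List (Bool × Bool))
    (h : List.Forall₂ (fun c f => ("0" ∈ c ↔ f.1 = true) ∧ ("1" ∈ c ↔ f.2 = true)) comps flags) :
    ∀ n, goA comps n = goB flags n := by
  induction h with
  | nil => intro n; rfl
  | @cons c f comps flags hcf _ ih =>
    intro n
    simp only [goA, goB]
    obtain ⟨h0, h1⟩ := hcf
    by_cases hc1 : "1" ∈ c <;> by_cases hc0 : "0" ∈ c
    · have : f.1 = true := h0.1 hc0
      have : f.2 = true := h1.1 hc1
      simp [*]
    · have hf0 : f.1 = false := by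
        cases hf : f.1
        · rfl
        · exact absurd (h0.2 hf) hc0
      have : f.2 = true := h1.1 hc1
      simp [*]
    · have hf1 : f.2 = false := by
        cases hf : f.2
        · rfl
        · exact absurd (h1.2 hf) hc1
      have : f.1 = true := h0.1 hc0
      simp [*]
    · have hf0 : f.1 = false := by
        cases hf : f.1
        · rfl
        · exact absurd (h0.2 hf) hc0
      have hf1 : f.2 = false := by
        cases hf : f.2
        · rfl
        · exact absurd (h1.2 hf) hc1
      simp [*]

-- ---------- B side: the flat union-find ----------

def rootD (d : PySem.Dict String String) (u : String) : String := d.getD u u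

def CompInv (E : List (String × String)) (d : PySem.Dict String String) : Prop :=
  d.keys = nodesList E ∧
  (∀ u ∈ d.keys, rootD d u ∈ d.keys ∧ Conn E u (rootD d u)) ∧
  (∀ u v, u ∈ d.keys → v ∈ d.keys → (rootD d u = rootD d v ↔ Conn E u v))

theorem get?_mk_map_value (ps : List (String × String)) (g : String → String) (u : String) :
    (PySem.Dict.mk (ps.map (fun q => (q.1, g q.2)))).get? u
      = ((PySem.Dict.mk ps).get? u).map g := by
  induction ps with
  | nil => rfl
  | cons q ps ih =>
    obtain ⟨k, v⟩ := q
    simp only [List.map_cons, PySem.Dict.get?_mk_cons]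
    rcases Bool.eq_false_or_eq_true (k == u) with h | h <;> rw [h]
    · rw [if_pos rfl, if_pos rfl]
      rfl
    · rw [if_neg (by simp), if_neg (by simp)]
      exact ih

theorem get?_eq_some_getD {ν : Type} (d : PySem.Dict String ν) {u : String}
    (hu : u ∈ d.keys) (dflt : ν) : d.get? u = some (d.getD u dflt) := by
  have hc : d.contains u = true := (PySem.Dict.contains_iff_mem_keys _ _).2 hu
  rw [PySem.Dict.contains_eq_isSome_get?] at hc
  obtain ⟨x, hx⟩ := Option.isSome_iff_exists.1 hc
  rw [PySem.Dict.getD_eq_get?_getD, hx]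
  rfl

theorem getD_of_not_mem_keys {ν : Type} (d : PySem.Dict String ν) {u : String}
    (hu : u ∉ d.keys) (dflt : ν) : d.getD u dflt = dflt := by
  refine PySem.Dict.getD_of_not_contains _ _ ?_
  rw [← Bool.not_eq_true, PySem.Dict.contains_iff_mem_keys]
  exact hu

def relabF (rl rr x : String) : String := if x = rl then rr else x

def baseF (d : PySem.Dict String String) (p : String × String) (u : String) : String :=
  if u = p.2 then d.getD p.2 p.2 else if u = p.1 then d.getD p.1 p.1 else rootD d u

theorem mergeStep_get? (d : PySem.Dict String String) (p : String × String) (u : String) :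
    (mergeStep d p).get? u
      = (((d.insert p.1 (d.getD p.1 p.1)).insert p.2 (d.getD p.2 p.2)).get? u).map
          (relabF (d.getD p.1 p.1) (d.getD p.2 p.2)) := by
  simp only [mergeStep]
  by_cases h : d.getD p.1 p.1 ≠ d.getD p.2 p.2
  · rw [if_pos h]
    have hf : (fun q : String × String =>
          if q.2 = d.getD p.1 p.1 then (q.1, d.getD p.2 p.2) else q)
        = fun q => (q.1, relabF (d.getD p.1 p.1) (d.getD p.2 p.2) q.2) := by
      funext q; by_cases hq : q.2 = d.getD p.1 p.1 <;> simp [relabF, hq]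
    rw [hf, get?_mk_map_value _ (relabF (d.getD p.1 p.1) (d.getD p.2 p.2))]
  · rw [if_neg h]
    rw [not_not] at h
    cases hx : ((d.insert p.1 (d.getD p.1 p.1)).insert p.2 (d.getD p.2 p.2)).get? u with
    | none => rfl
    | some x =>
      simp only [Option.map_some, relabF]
      rw [h]
      by_cases hxx : x = d.getD p.2 p.2 <;> simp [hxx]

theorem mergeStep_keys (d : PySem.Dict String String) (p : String × String) :
    (mergeStep d p).keys
      = ((d.insert p.1 (d.getD p.1 p.1)).insert p.2 (d.getD p.2 p.2)).keys := by
  simp only [mergeStep]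
  by_cases h : d.getD p.1 p.1 ≠ d.getD p.2 p.2
  · rw [if_pos h, PySem.Dict.keys_mk]
    have hrhs : ((d.insert p.1 (d.getD p.1 p.1)).insert p.2 (d.getD p.2 p.2)).keys
        = ((d.insert p.1 (d.getD p.1 p.1)).insert p.2 (d.getD p.2 p.2)).items.map
            (fun q => q.1) := rfl
    rw [hrhs, List.map_map]
    refine List.map_congr_left ?_
    intro q _
    by_cases hq : q.2 = d.getD p.1 p.1 <;> simp [hq]
  · rw [if_neg h]

theorem mergeStep_inv {E : List (String × String)} {d : PySem.Dict String String}
    (hinv : CompInv E d) (p : String × String) :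
    CompInv (E ++ [p]) (mergeStep d p) := by
  obtain ⟨hkeys, hroots, hiff⟩ := hinv
  set rl := d.getD p.1 p.1 with hrl_def
  set rr := d.getD p.2 p.2 with hrr_def
  set d1 := (d.insert p.1 rl).insert p.2 rr with hd1_def
  -- keys of d1
  have hK1 : d1.keys = PySem.Set.add (PySem.Set.add d.keys p.1) p.2 := by
    rw [hd1_def, keys_insert_set, keys_insert_set]
  have hNodes : nodesList (E ++ [p])
      = PySem.Set.add (PySem.Set.add (nodesList E) p.1) p.2 := by
    rw [nodesList, List.flatMap_append, PySem.Set.ofList_append]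
    simp only [List.flatMap_cons, List.flatMap_nil, List.append_nil]
    rw [PySem.Set.update_cons, PySem.Set.update_cons, PySem.Set.update_nil]
    rfl
  have hKeysFinal : (mergeStep d p).keys = nodesList (E ++ [p]) := by
    rw [mergeStep_keys, ← hd1_def, hK1, hkeys, hNodes]
  have hmemK1 : ∀ u, u ∈ d1.keys ↔ u ∈ d.keys ∨ u = p.1 ∨ u = p.2 := by
    intro u
    rw [hK1, PySem.Set.mem_add, PySem.Set.mem_add]
    tauto
  -- getD of d1 is baseF
  have hgd1 : ∀ u, d1.getD u u = baseF d p u := by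
    intro u
    rw [hd1_def, PySem.Dict.getD_insert, PySem.Dict.getD_insert]
    simp [baseF, rootD, ← hrl_def, ← hrr_def]
  -- root of the merged dict
  have hroot' : ∀ u ∈ d1.keys, rootD (mergeStep d p) u = relabF rl rr (baseF d p u) := by
    intro u hu
    rw [rootD, PySem.Dict.getD_eq_get?_getD, mergeStep_get?, ← hd1_def,
      get?_eq_some_getD d1 hu u, hgd1]
    rfl
  -- base in terms of membership in d.keys
  have hbase_char : ∀ u ∈ d1.keys, baseF d p u = if u ∈ d.keys then rootD d u else u := by
    intro u hu
    by_cases h2 : u = p.2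
    · have hb : baseF d p u = rr := by simp [baseF, h2, hrr_def]
      rw [hb]
      by_cases hm : u ∈ d.keys
      · rw [if_pos hm, h2, hrr_def]
        rfl
      · rw [if_neg hm, h2, hrr_def]
        exact getD_of_not_mem_keys d (h2 ▸ hm) _
    · by_cases h1 : u = p.1
      · have hb : baseF d p u = rl := by
          have h2' : ¬ p.1 = p.2 := fun h => h2 (h1.trans h)
          simp [baseF, h1, h2', hrl_def]
        rw [hb]
        by_cases hm : u ∈ d.keys
        · rw [if_pos hm, h1, hrl_def]
          rfl
        · rw [if_neg hm, h1, hrl_def]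
          exact getD_of_not_mem_keys d (h1 ▸ hm) _
      · have hm : u ∈ d.keys := by
          rcases (hmemK1 u).1 hu with h | h | h
          · exact h
          · exact absurd h h1
          · exact absurd h h2
        have hb : baseF d p u = rootD d u := by simp [baseF, h1, h2]
        rw [hb, if_pos hm]
  -- connectivity facts
  have hCl : Conn (E ++ [p]) p.1 rl := by
    by_cases hm : p.1 ∈ d.keys
    · exact conn_mono (hroots p.1 (hkeys ▸ hm)).2
    · rw [hrl_def, getD_of_not_mem_keys d hm]
      exact Relation.ReflTransGen.refl
  have hCr : Conn (E ++ [p]) p.2 rr := by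
    by_cases hm : p.2 ∈ d.keys
    · exact conn_mono (hroots p.2 (hkeys ▸ hm)).2
    · rw [hrr_def, getD_of_not_mem_keys d hm]
      exact Relation.ReflTransGen.refl
  have hedge : Conn (E ++ [p]) p.1 p.2 :=
    conn_single (Or.inl (List.mem_append_right _ (by simp)))
  have hrlrr : Conn (E ++ [p]) rl rr :=
    ((conn_symm hCl).trans hedge).trans hCr
  have hrel : ∀ x, Conn (E ++ [p]) x (relabF rl rr x) := by
    intro x
    by_cases h : x = rl
    · subst h
      simp only [relabF, if_true]
      exact hrlrr
    · simp only [relabF, if_neg h]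
      exact Relation.ReflTransGen.refl
  have hconn_base : ∀ u ∈ d1.keys, Conn (E ++ [p]) u (baseF d p u) := by
    intro u hu
    rw [hbase_char u hu]
    by_cases hm : u ∈ d.keys
    · rw [if_pos hm]; exact conn_mono (hroots u (hkeys ▸ hm)).2
    · rw [if_neg hm]; exact Relation.ReflTransGen.refl
  have hbase_mem : ∀ u ∈ d1.keys, baseF d p u ∈ d1.keys := by
    intro u hu
    rw [hbase_char u hu]
    by_cases hm : u ∈ d.keys
    · rw [if_pos hm]
      exact (hmemK1 _).2 (Or.inl (hkeys ▸ (hroots u (hkeys ▸ hm)).1))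
    · rw [if_neg hm]; exact hu
  have hrr_mem : rr ∈ d1.keys := by
    have h2 : p.2 ∈ d1.keys := (hmemK1 _).2 (Or.inr (Or.inr rfl))
    have hb := hbase_mem p.2 h2
    rwa [show baseF d p p.2 = rr from by simp [baseF, hrr_def]] at hb
  have hrelab_mem : ∀ x ∈ d1.keys, relabF rl rr x ∈ d1.keys := by
    intro x hx
    by_cases h : x = rl
    · simp only [relabF, if_pos h]; exact hrr_mem
    · simp only [relabF, if_neg h]; exact hx
  -- base of a node E-connected to p.1 is rl; to p.2 is rr
  have hbase_conn1 : ∀ u ∈ d1.keys, Conn E u p.1 → baseF d p u = rl := by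
    intro u hu hc
    rw [hbase_char u hu]
    by_cases hm : u ∈ d.keys
    · rw [if_pos hm]
      have h1m : p.1 ∈ d.keys := hkeys ▸ conn_mem (hkeys ▸ hm) hc
      exact (hiff u p.1 hm h1m).2 hc
    · rw [if_neg hm]
      have hup : p.1 = u := conn_eq_of_not_mem (hkeys ▸ hm) hc
      rw [← hup, hrl_def, getD_of_not_mem_keys d (hup ▸ hm)]
  have hbase_conn2 : ∀ u ∈ d1.keys, Conn E u p.2 → baseF d p u = rr := by
    intro u hu hc
    rw [hbase_char u hu]
    by_cases hm : u ∈ d.keys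
    · rw [if_pos hm]
      have h2m : p.2 ∈ d.keys := hkeys ▸ conn_mem (hkeys ▸ hm) hc
      exact (hiff u p.2 hm h2m).2 hc
    · rw [if_neg hm]
      have hup : p.2 = u := conn_eq_of_not_mem (hkeys ▸ hm) hc
      rw [← hup, hrr_def, getD_of_not_mem_keys d (hup ▸ hm)]
  have hrelab_rl : relabF rl rr rl = rr := by simp [relabF]
  have hrelab_rr : relabF rl rr rr = rr := by
    by_cases h : rr = rl <;> simp [relabF, h]
  -- the characterising iff
  have hchar : ∀ u v, u ∈ d1.keys → v ∈ d1.keys →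
      (relabF rl rr (baseF d p u) = relabF rl rr (baseF d p v) ↔ Conn (E ++ [p]) u v) := by
    intro u v hu hv
    constructor
    · intro heq
      have h1 : Conn (E ++ [p]) u (relabF rl rr (baseF d p u)) :=
        (hconn_base u hu).trans (hrel (baseF d p u))
      have h2 : Conn (E ++ [p]) v (relabF rl rr (baseF d p v)) :=
        (hconn_base v hv).trans (hrel (baseF d p v))
      rw [heq] at h1
      exact h1.trans (conn_symm h2)
    · intro hc
      rcases conn_snoc.1 hc with h | ⟨h1, h2⟩ | ⟨h1, h2⟩
      · by_cases hm : u ∈ d.keys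
        · have hvm : v ∈ d.keys := hkeys ▸ conn_mem (hkeys ▸ hm) h
          have hrt : rootD d u = rootD d v := (hiff u v hm hvm).2 h
          rw [hbase_char u hu, hbase_char v hv, if_pos hm, if_pos hvm, hrt]
        · have hvu : v = u := conn_eq_of_not_mem (hkeys ▸ hm) h
          rw [hvu]
      · rw [hbase_conn1 u hu h1, hbase_conn2 v hv (conn_symm h2), hrelab_rl, hrelab_rr]
      · rw [hbase_conn2 u hu h1, hbase_conn1 v hv (conn_symm h2), hrelab_rl, hrelab_rr]
  have hkeys_merge : (mergeStep d p).keys = d1.keys := by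
    rw [mergeStep_keys, ← hd1_def]
  refine ⟨hKeysFinal, ?_, ?_⟩
  · intro u hu
    have hu1 : u ∈ d1.keys := hkeys_merge ▸ hu
    constructor
    · rw [hkeys_merge, hroot' u hu1]
      exact hrelab_mem _ (hbase_mem u hu1)
    · rw [hroot' u hu1]
      exact (hconn_base u hu1).trans (hrel (baseF d p u))
  · intro u v hu hv
    have hu1 : u ∈ d1.keys := hkeys_merge ▸ hu
    have hv1 : v ∈ d1.keys := hkeys_merge ▸ hv
    rw [hroot' u hu1, hroot' v hv1]
    exact hchar u v hu1 hv1

theorem buildComp_snoc (E : List (String × String)) (p : String × String) :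
    buildComp (E ++ [p]) = mergeStep (buildComp E) p := by
  unfold buildComp
  rw [List.foldl_append]
  rfl

theorem buildComp_inv (E : List (String × String)) : CompInv E (buildComp E) := by
  induction E using List.reverseRecOn with
  | nil =>
    refine ⟨rfl, ?_, ?_⟩
    · intro u hu
      simp [buildComp, PySem.Dict.keys_empty] at hu
    · intro u v hu _
      simp [buildComp, PySem.Dict.keys_empty] at hu
  | append_singleton E p ih =>
    rw [buildComp_snoc]
    exact mergeStep_inv ih p

-- the flags fold studied over an abstract root-assignment ρ
def flStep (fl : PySem.Dict String (Bool × Bool)) (q : String × String) :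
    PySem.Dict String (Bool × Bool) :=
  fl.insert q.2 ((fl.getD q.2 (false, false)).1 || decide (q.1 = "0"),
    (fl.getD q.2 (false, false)).2 || decide (q.1 = "1"))

def repsAux (ρ : String → String) (seen : List String) : List String → List String
  | [] => []
  | k :: P => if ρ k ∈ seen then repsAux ρ seen P else k :: repsAux ρ (ρ k :: seen) P

def flagVal (ρ : String → String) (P : List String) (v : String) : Bool × Bool :=
  (decide ("0" ∈ P ∧ ρ "0" = ρ v), decide ("1" ∈ P ∧ ρ "1" = ρ v))

theorem flagVal_root_eq (ρ : String → String) (P : List String) {a b : String}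
    (h : ρ a = ρ b) : flagVal ρ P a = flagVal ρ P b := by
  simp [flagVal, h]

theorem repsAux_mem (ρ : String → String) :
    ∀ (P seen : List String) (v : String), v ∈ repsAux ρ seen P → v ∈ P := by
  intro P
  induction P with
  | nil => intro seen v hv; cases hv
  | cons j P ih =>
    intro seen v hv
    rw [repsAux] at hv
    by_cases h : ρ j ∈ seen
    · rw [if_pos h] at hv
      exact List.mem_cons_of_mem _ (ih seen v hv)
    · rw [if_neg h] at hv
      rcases List.mem_cons.1 hv with rfl | hv
      · exact List.mem_cons_self ..
      · exact List.mem_cons_of_mem _ (ih _ v hv)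

theorem repsAux_roots_nodup (ρ : String → String) :
    ∀ (P seen : List String), ((repsAux ρ seen P).map ρ).Nodup ∧
      (∀ x ∈ (repsAux ρ seen P).map ρ, x ∉ seen) := by
  intro P
  induction P with
  | nil => intro seen; exact ⟨List.nodup_nil, fun x hx => absurd hx (List.not_mem_nil)⟩
  | cons j P ih =>
    intro seen
    rw [repsAux]
    by_cases h : ρ j ∈ seen
    · rw [if_pos h]
      exact ih seen
    · rw [if_neg h]
      obtain ⟨ihn, ihd⟩ := ih (ρ j :: seen)
      simp only [List.map_cons]
      constructor
      · refine List.nodup_cons.2 ⟨?_, ihn⟩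
        intro hmem
        exact ihd _ hmem (List.mem_cons_self ..)
      · intro x hx
        rcases List.mem_cons.1 hx with rfl | hx
        · exact h
        · exact fun hs => ihd x hx (List.mem_cons_of_mem _ hs)

theorem repsAux_roots_cover (ρ : String → String) :
    ∀ (P seen : List String) (u : String), u ∈ P →
      ρ u ∈ seen ∨ ρ u ∈ (repsAux ρ seen P).map ρ := by
  intro P
  induction P with
  | nil => intro seen u hu; cases hu
  | cons j P ih =>
    intro seen u hu
    rw [repsAux]
    by_cases h : ρ j ∈ seen
    · rw [if_pos h]
      rcases List.mem_cons.1 hu with rfl | hu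
      · exact Or.inl h
      · exact ih seen u hu
    · rw [if_neg h]
      simp only [List.map_cons]
      rcases List.mem_cons.1 hu with rfl | hu
      · exact Or.inr (List.mem_cons_self ..)
      · rcases ih (ρ j :: seen) u hu with hs | hs
        · rcases List.mem_cons.1 hs with heq | hs
          · exact Or.inr (heq ▸ List.mem_cons_self ..)
          · exact Or.inl hs
        · exact Or.inr (List.mem_cons_of_mem _ hs)

theorem repsAux_snoc (ρ : String → String) :
    ∀ (P seen : List String) (k : String),
      repsAux ρ seen (P ++ [k]) = repsAux ρ seen P ++
        (if ρ k ∈ seen ∨ ρ k ∈ (repsAux ρ seen P).map ρ then [] else [k]) := by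
  intro P
  induction P with
  | nil =>
    intro seen k
    simp only [List.nil_append, repsAux, List.map_nil]
    by_cases h : ρ k ∈ seen
    · simp [h]
    · simp [h]
  | cons j P ih =>
    intro seen k
    simp only [List.cons_append, repsAux]
    by_cases h : ρ j ∈ seen
    · simp only [eq_true h, if_true]
      exact ih seen k
    · simp only [eq_false h, if_false]
      rw [ih (ρ j :: seen) k]
      simp only [List.map_cons, List.cons_append, List.mem_cons]
      by_cases hk : ρ k ∈ ρ j :: seen
      · rcases List.mem_cons.1 hk with heq | hk'
        · simp [heq]
        · simp [hk']
      · have h1 : ρ k ∉ seen := fun hs => hk (List.mem_cons_of_mem _ hs)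
        have h2 : ¬ ρ k = ρ j := fun he => hk (he ▸ List.mem_cons_self ..)
        simp [h1, h2]

theorem flStep_items (ρ : String → String) (P : List String) (k : String)
    (fl : PySem.Dict String (Bool × Bool))
    (hfl : fl.items = (repsAux ρ [] P).map (fun v => (ρ v, flagVal ρ P v))) :
    (flStep fl (k, ρ k)).items
      = (repsAux ρ [] (P ++ [k])).map (fun v => (ρ v, flagVal ρ (P ++ [k]) v)) := by
  have hkeysEq : fl.keys = (repsAux ρ [] P).map ρ := by
    show fl.items.map (fun q => q.1) = _
    rw [hfl, List.map_map]
    rfl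
  have hnodup : fl.keys.Nodup := by
    rw [hkeysEq]
    exact (repsAux_roots_nodup ρ P []).1
  by_cases hmem : ρ k ∈ (repsAux ρ [] P).map ρ
  · -- the root is already present: overwrite in place
    have hcon : fl.contains (ρ k) = true := by
      rw [PySem.Dict.contains_iff_mem_keys, hkeysEq]
      exact hmem
    obtain ⟨v0, hv0mem, hv0root⟩ := List.mem_map.1 hmem
    have hpair : (ρ v0, flagVal ρ P v0) ∈ fl.items := by
      rw [hfl]
      exact List.mem_map_of_mem hv0mem
    have hf : fl.getD (ρ k) (false, false) = flagVal ρ P v0 := by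
      rw [← hv0root]
      exact PySem.Dict.getD_of_mem_items fl hpair hnodup _
    have hreps : repsAux ρ [] (P ++ [k]) = repsAux ρ [] P := by
      rw [repsAux_snoc]
      simp [hmem]
    show (fl.insert (ρ k) _).items = _
    rw [PySem.Dict.items_insert_of_contains fl _ hcon, hfl, List.map_map, hreps]
    refine List.map_congr_left ?_
    intro v hv
    simp only [Function.comp]
    by_cases hρv : ρ v = ρ k
    · rw [if_pos (by simp [hρv])]
      have hvv0 : flagVal ρ P v0 = flagVal ρ P v :=
        flagVal_root_eq ρ P (by rw [hv0root, hρv])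
      rw [hf, hvv0]
      refine Prod.ext (by simp [hρv]) ?_
      show ((flagVal ρ P v).1 || decide (k = "0"), (flagVal ρ P v).2 || decide (k = "1"))
          = flagVal ρ (P ++ [k]) v
      have hcomp : ∀ c : String, (decide (c ∈ P ∧ ρ c = ρ v) || decide (k = c))
          = decide (c ∈ P ++ [k] ∧ ρ c = ρ v) := by
        intro c
        by_cases hk : k = c
        · subst hk
          have hkv : ρ k = ρ v := hρv.symm
          simp [List.mem_append, hkv]
        · have h2 : (c ∈ P ++ [k]) ↔ c ∈ P := by
            simp only [List.mem_append, List.mem_singleton]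
            constructor
            · rintro (h | h)
              · exact h
              · exact absurd h.symm hk
            · exact Or.inl
          simp [hk, h2]
      refine Prod.ext ?_ ?_
      · show ((flagVal ρ P v).1 || decide (k = "0")) = (flagVal ρ (P ++ [k]) v).1
        simp only [flagVal]
        exact hcomp "0"
      · show ((flagVal ρ P v).2 || decide (k = "1")) = (flagVal ρ (P ++ [k]) v).2
        simp only [flagVal]
        exact hcomp "1" 
    · rw [if_neg (by simp [hρv])]
      refine Prod.ext rfl ?_
      show flagVal ρ P v = flagVal ρ (P ++ [k]) v
      have hcomp : ∀ c : String, decide (c ∈ P ∧ ρ c = ρ v)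
          = decide (c ∈ P ++ [k] ∧ ρ c = ρ v) := by
        intro c
        by_cases hcv : ρ c = ρ v
        · have hck : ¬ c = k := fun he => hρv (by rw [← hcv, he])
          have : (c ∈ P ++ [k]) ↔ c ∈ P := by
            simp only [List.mem_append, List.mem_singleton]
            constructor
            · rintro (h | h)
              · exact h
              · exact absurd h hck
            · exact Or.inl
          simp [this]
        · simp [hcv]
      refine Prod.ext ?_ ?_
      · show (flagVal ρ P v).1 = (flagVal ρ (P ++ [k]) v).1
        simp only [flagVal]
        exact hcomp "0"
      · show (flagVal ρ P v).2 = (flagVal ρ (P ++ [k]) v).2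
        simp only [flagVal]
        exact hcomp "1" 
  · -- a new root: the entry is appended
    have hcon : fl.contains (ρ k) = false := by
      rw [← Bool.not_eq_true, PySem.Dict.contains_iff_mem_keys, hkeysEq]
      exact hmem
    have hf : fl.getD (ρ k) (false, false) = (false, false) :=
      getD_of_not_mem_keys fl (by rw [hkeysEq]; exact hmem) _
    have hreps : repsAux ρ [] (P ++ [k]) = repsAux ρ [] P ++ [k] := by
      rw [repsAux_snoc]
      simp [hmem]
    show (fl.insert (ρ k) _).items = _
    rw [PySem.Dict.items_insert_of_not_contains fl _ hcon, hreps, List.map_append, hfl]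
    congr 1
    · refine List.map_congr_left ?_
      intro v hv
      have hρv : ¬ ρ v = ρ k := by
        intro he
        exact hmem (he ▸ List.mem_map_of_mem hv)
      refine Prod.ext rfl ?_
      show flagVal ρ P v = flagVal ρ (P ++ [k]) v
      have hcomp : ∀ c : String, decide (c ∈ P ∧ ρ c = ρ v)
          = decide (c ∈ P ++ [k] ∧ ρ c = ρ v) := by
        intro c
        by_cases hcv : ρ c = ρ v
        · have hck : ¬ c = k := fun he => hρv (by rw [← hcv, he])
          have : (c ∈ P ++ [k]) ↔ c ∈ P := by
            simp only [List.mem_append, List.mem_singleton]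
            constructor
            · rintro (h | h)
              · exact h
              · exact absurd h hck
            · exact Or.inl
          simp [this]
        · simp [hcv]
      refine Prod.ext ?_ ?_
      · show (flagVal ρ P v).1 = (flagVal ρ (P ++ [k]) v).1
        simp only [flagVal]
        exact hcomp "0"
      · show (flagVal ρ P v).2 = (flagVal ρ (P ++ [k]) v).2
        simp only [flagVal]
        exact hcomp "1" 
    · rw [hf]
      have hcomp : ∀ c : String, (decide (k = c) : Bool)
          = decide (c ∈ P ++ [k] ∧ ρ c = ρ k) := by
        intro c
        by_cases hk : k = c
        · subst hk
          simp [List.mem_append]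
        · have hnc : ¬ (c ∈ P ++ [k] ∧ ρ c = ρ k) := by
            rintro ⟨hcP, hcρ⟩
            rcases List.mem_append.1 hcP with hcP | hcP
            · rcases repsAux_roots_cover ρ P [] c hcP with hs | hs
              · exact absurd hs (List.not_mem_nil)
              · exact hmem (hcρ ▸ hs)
            · rw [List.mem_singleton] at hcP
              exact hk hcP.symm
          rw [decide_eq_false hk, decide_eq_false hnc]
      have hval : (((false, false) : Bool × Bool).1 || decide (k = "0"),
          ((false, false) : Bool × Bool).2 || decide (k = "1"))
          = flagVal ρ (P ++ [k]) k := by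
        refine Prod.ext ?_ ?_
        · show (false || decide (k = "0")) = (flagVal ρ (P ++ [k]) k).1
          simp only [flagVal, Bool.false_or]
          exact hcomp "0"
        · show (false || decide (k = "1")) = (flagVal ρ (P ++ [k]) k).2
          simp only [flagVal, Bool.false_or]
          exact hcomp "1"
      rw [hval]
      simp

theorem flags_foldl (ρ : String → String) :
    ∀ (Q P : List String) (fl : PySem.Dict String (Bool × Bool)),
      fl.items = (repsAux ρ [] P).map (fun v => (ρ v, flagVal ρ P v)) →
      (Q.foldl (fun fl k => flStep fl (k, ρ k)) fl).items
        = (repsAux ρ [] (P ++ Q)).map (fun v => (ρ v, flagVal ρ (P ++ Q) v)) := by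
  intro Q
  induction Q with
  | nil =>
    intro P fl hfl
    simpa using hfl
  | cons k Q ih =>
    intro P fl hfl
    simp only [List.foldl_cons]
    have hstep := flStep_items ρ P k fl hfl
    have := ih (P ++ [k]) (flStep fl (k, ρ k)) hstep
    rwa [show (P ++ [k]) ++ Q = P ++ k :: Q by simp] at this

theorem repsAux_repsOf (E : List (String × String)) (ρ : String → String)
    (hρ : ∀ u v, u ∈ nodesList E → v ∈ nodesList E → (ρ u = ρ v ↔ Conn E u v)) :
    ∀ (Q seen sr : List String), (∀ k ∈ Q, k ∈ nodesList E) →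
      (∀ u ∈ seen, u ∈ nodesList E) →
      (∀ x, x ∈ sr ↔ ∃ u ∈ seen, ρ u = x) →
      RepsOf E seen Q (repsAux ρ sr Q) := by
  intro Q
  induction Q with
  | nil => intro seen sr _ _ _; exact RepsOf.nil seen
  | cons k Q ih =>
    intro seen sr hQ hseen hsr
    have hkE : k ∈ nodesList E := hQ k (List.mem_cons_self ..)
    rw [repsAux]
    by_cases h : ρ k ∈ sr
    · rw [if_pos h]
      obtain ⟨u, hu, hru⟩ := (hsr (ρ k)).1 h
      refine RepsOf.skip ⟨u, hu, (hρ u k (hseen u hu) hkE).1 hru⟩ ?_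
      refine ih (seen ++ [k]) sr (fun x hx => hQ x (List.mem_cons_of_mem _ hx)) ?_ ?_
      · intro x hx
        rcases List.mem_append.1 hx with hx | hx
        · exact hseen x hx
        · rw [List.mem_singleton] at hx; exact hx ▸ hkE
      · intro x
        rw [hsr x]
        constructor
        · rintro ⟨w, hw, hrw⟩; exact ⟨w, List.mem_append_left _ hw, hrw⟩
        · rintro ⟨w, hw, hrw⟩
          rcases List.mem_append.1 hw with hw | hw
          · exact ⟨w, hw, hrw⟩
          · rw [List.mem_singleton] at hw
            subst hw
            exact hrw ▸ ⟨u, hu, hru⟩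
    · rw [if_neg h]
      refine RepsOf.keep ?_ ?_
      · rintro ⟨u, hu, hc⟩
        exact h ((hsr (ρ k)).2 ⟨u, hu, (hρ u k (hseen u hu) hkE).2 hc⟩)
      · refine ih (seen ++ [k]) (ρ k :: sr) (fun x hx => hQ x (List.mem_cons_of_mem _ hx)) ?_ ?_
        · intro x hx
          rcases List.mem_append.1 hx with hx | hx
          · exact hseen x hx
          · rw [List.mem_singleton] at hx; exact hx ▸ hkE
        · intro x
          rw [List.mem_cons, hsr x]
          constructor
          · rintro (rfl | ⟨w, hw, hrw⟩)
            · exact ⟨k, List.mem_append_right _ (List.mem_singleton.2 rfl), rfl⟩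
            · exact ⟨w, List.mem_append_left _ hw, hrw⟩
          · rintro ⟨w, hw, hrw⟩
            rcases List.mem_append.1 hw with hw | hw
            · exact Or.inr ⟨w, hw, hrw⟩
            · rw [List.mem_singleton] at hw
              subst hw
              exact Or.inl hrw.symm

theorem forall₂_of_map {α β : Type} (f : α → β) (R : α → β → Prop) (l : List α)
    (h : ∀ x ∈ l, R x (f x)) : List.Forall₂ R l (l.map f) := by
  induction l with
  | nil => exact List.Forall₂.nil
  | cons x l ih =>
    exact List.Forall₂.cons (h x (List.mem_cons_self ..))
      (ih (fun y hy => h y (List.mem_cons_of_mem _ hy)))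

theorem flags_spec (E : List (String × String)) :
    ∃ reps, RepsOf E [] (nodesList E) reps ∧
      List.Forall₂ (fun v f => (f.1 = true ↔ Conn E v "0") ∧ (f.2 = true ↔ Conn E v "1"))
        reps (flagsOf (buildComp E)).values := by
  obtain ⟨hkeys, hroots, hiff⟩ := buildComp_inv E
  have hnodup : (buildComp E).keys.Nodup := by
    rw [hkeys]
    exact PySem.Set.nodup_ofList _
  have hgetD : ∀ k ∈ (buildComp E).keys, (buildComp E).getD k "" = rootD (buildComp E) k := by
    intro k hk
    have h1 := get?_eq_some_getD (buildComp E) hk ""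
    have h2 := get?_eq_some_getD (buildComp E) hk k
    rw [h1] at h2
    exact Option.some.inj h2
  have hitems : (buildComp E).items
      = (nodesList E).map (fun k => (k, rootD (buildComp E) k)) := by
    rw [PySem.Dict.items_eq_map_keys (buildComp E) hnodup ""]
    rw [show ((buildComp E).keys.map (fun k => (k, (buildComp E).getD k "")))
        = (buildComp E).keys.map (fun k => (k, rootD (buildComp E) k)) from
      List.map_congr_left (fun k hk => by rw [hgetD k hk]), hkeys]
  have hfl : (flagsOf (buildComp E)).items
      = (repsAux (rootD (buildComp E)) [] (nodesList E)).map
          (fun v => (rootD (buildComp E) v, flagVal (rootD (buildComp E)) (nodesList E) v)) := by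
    have h0 : flagsOf (buildComp E)
        = (nodesList E).foldl
            (fun fl k => flStep fl (k, rootD (buildComp E) k)) PySem.Dict.empty := by
      show (buildComp E).items.foldl flStep PySem.Dict.empty = _
      rw [hitems, List.foldl_map]
    rw [h0]
    have := flags_foldl (rootD (buildComp E)) (nodesList E) [] PySem.Dict.empty rfl
    simpa using this
  have hρ : ∀ u v, u ∈ nodesList E → v ∈ nodesList E →
      (rootD (buildComp E) u = rootD (buildComp E) v ↔ Conn E u v) :=
    fun u v hu hv => hiff u v (hkeys ▸ hu) (hkeys ▸ hv)
  refine ⟨repsAux (rootD (buildComp E)) [] (nodesList E), ?_, ?_⟩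
  · exact repsAux_repsOf E (rootD (buildComp E)) hρ (nodesList E) [] []
      (fun k hk => hk) (fun u hu => absurd hu (List.not_mem_nil))
      (fun x => by simp)
  · have hvals : (flagsOf (buildComp E)).values
        = (repsAux (rootD (buildComp E)) [] (nodesList E)).map
            (flagVal (rootD (buildComp E)) (nodesList E)) := by
      show (flagsOf (buildComp E)).items.map (fun q => q.2) = _
      rw [hfl, List.map_map]
      rfl
    rw [hvals]
    refine forall₂_of_map _ _ _ ?_
    intro v hv
    have hvK : v ∈ nodesList E :=
      repsAux_mem (rootD (buildComp E)) (nodesList E) [] v hv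
    constructor
    · simp only [flagVal, decide_eq_true_eq]
      constructor
      · rintro ⟨h0K, hr⟩
        exact conn_symm ((hρ "0" v h0K hvK).1 hr)
      · intro hc
        have h0K : "0" ∈ nodesList E := conn_mem hvK hc
        exact ⟨h0K, (hρ "0" v h0K hvK).2 (conn_symm hc)⟩
    · simp only [flagVal, decide_eq_true_eq]
      constructor
      · rintro ⟨h1K, hr⟩
        exact conn_symm ((hρ "1" v h1K hvK).1 hr)
      · intro hc
        have h1K : "1" ∈ nodesList E := conn_mem hvK hc
        exact ⟨h1K, (hρ "1" v h1K hvK).2 (conn_symm hc)⟩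

-- ---------- combining ----------

theorem forall₂_combine {α β γ : Type} {R : α → β → Prop} {S : α → γ → Prop}
    {T : β → γ → Prop} {a : List α} {b : List β} {c : List γ}
    (hab : List.Forall₂ R a b) (hac : List.Forall₂ S a c)
    (h : ∀ x y z, R x y → S x z → T y z) : List.Forall₂ T b c := by
  induction hab generalizing c with
  | nil => cases hac; exact List.Forall₂.nil
  | cons hxy _ ih =>
    cases hac with
    | cons hxz htl => exact List.Forall₂.cons (h _ _ _ hxy hxz) (ih htl)

theorem core_eq (E : List (String × String)) :
    goA (fccA (buildGA E)) 0 = goB (flagsOf (buildComp E)).values 0 := by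
  obtain ⟨repsA, hrepsA, hfaA⟩ := fcc_spec E
  obtain ⟨repsB, hrepsB, hfaB⟩ := flags_spec E
  have hAB : repsA = repsB := repsOf_unique hrepsA hrepsB
  subst hAB
  have hT : List.Forall₂ (fun c f => ("0" ∈ c ↔ f.1 = true) ∧ ("1" ∈ c ↔ f.2 = true))
      (fccA (buildGA E)) (flagsOf (buildComp E)).values := by
    refine forall₂_combine hfaA hfaB ?_
    intro v c f hc hf
    exact ⟨(hc "0").trans (hf.1).symm, (hc "1").trans (hf.2).symm⟩
  exact goA_goB _ _ hT 0

theorem extendB_eq_extendA : pyExtendB = pyExtendA := rfl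

theorem pre_bridge {left right : String} {lengths : List (String × Int)}
    (h : Pre_count_possible_answers left right lengths) :
    ∀ c ∈ left.toList ++ right.toList,
      c = '0' ∨ c = '1' ∨ String.ofList [c] ∈ lengths.map Prod.fst := by
  rw [Pre_count_possible_answers, List.all_eq_true] at h
  intro c hc
  have hcb := h c hc
  simp only [Bool.or_eq_true, beq_iff_eq, List.any_eq_true] at hcb
  rcases hcb with (h1 | h2) | ⟨q, hq, he⟩
  · exact Or.inl h1
  · exact Or.inr (Or.inl h2)
  · exact Or.inr (Or.inr (List.mem_map.2 ⟨q, hq, he⟩))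

theorem extendA_some {text : String} {lengths : List (String × Int)}
    (h : ∀ c ∈ text.toList, c = '0' ∨ c = '1' ∨ String.ofList [c] ∈ lengths.map Prod.fst) :
    ∃ l, pyExtendA text lengths = some l := by
  unfold pyExtendA
  suffices hgen : ∀ cs : List Char, (∀ c ∈ cs, c = '0' ∨ c = '1' ∨
      String.ofList [c] ∈ lengths.map Prod.fst) → ∀ acc : List String,
      ∃ l, cs.foldl (fun acc c =>
        match acc with
        | none => none
        | some ext =>
          if c ∈ ['0', '1'] then some (ext ++ [String.ofList [c]])
          else
            match (PySem.Dict.mk lengths).get? (String.ofList [c]) with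
            | none => none
            | some n => some (ext ++ (PySem.List.pyRange 0 n 1).map
                (fun j => String.ofList [c] ++ PySem.Int.toStr j)))
        (some acc) = some l by
    exact hgen text.toList h []
  intro cs hcs
  induction cs with
  | nil => intro acc; exact ⟨acc, rfl⟩
  | cons c cs ih =>
    intro acc
    simp only [List.foldl_cons]
    by_cases h01 : c ∈ ['0', '1']
    · rw [if_pos h01]
      exact ih (fun c hc => hcs c (List.mem_cons_of_mem _ hc)) _
    · have hmem : String.ofList [c] ∈ lengths.map Prod.fst := by
        rcases hcs c (List.mem_cons_self ..) with h | h | h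
        · exact absurd (by simp [h]) h01
        · exact absurd (by simp [h]) h01
        · exact h
      have : ∃ n, (PySem.Dict.mk lengths).get? (String.ofList [c]) = some n := by
        rcases hn : (PySem.Dict.mk lengths).get? (String.ofList [c]) with _ | n
        · rw [PySem.Dict.get?_eq_none_iff_not_mem_keys] at hn
          rw [PySem.Dict.keys_mk] at hn
          exact absurd hmem hn
        · exact ⟨n, rfl⟩
      obtain ⟨n, hn⟩ := this
      rw [if_neg h01]
      simp only [hn]
      exact ih (fun c hc => hcs c (List.mem_cons_of_mem _ hc)) _

-- ===== VERDICT (by name: the statement is the Claim_ definition above) =====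
theorem count_possible_answers_spec : Claim_equal_count_possible_answers := by
  intro left right lengths _hdom hpre0
  have hpre := pre_bridge hpre0
  unfold Spec_count_possible_answers
  unfold count_possible_answers count_possible_answers_alt
  rw [extendB_eq_extendA]
  obtain ⟨el, hel⟩ := extendA_some (fun c hc => hpre c (List.mem_append_left _ hc))
  obtain ⟨er, her⟩ := extendA_some (fun c hc => hpre c (List.mem_append_right _ hc))
  rw [hel, her]
  by_cases hlen : el.length ≠ er.length
  · simp [hlen]
  · simp only [hlen, if_false]
    exact core_eq (el.zip er)
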